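-- pv_equiv track=rewrite | github.com/ojhermann-ucd/comp30670Assignment3 | Modification.py | modificationModification
-- ===== SOURCE A (Python) =====
-- def modificationModificationMicro(theCommand, theBool):
--     if theCommand == "on":
--         return True
--     if theCommand == "off":
--         return False
--     if theCommand == "switch":
--         if theBool == True:
--             return False
--         else:
--             return True
--
-- def modificationModification(theList, theGrid): #input list and dictionary
--     #variables
--     theCommand = theList[0]
--     xStart = theList[1][0]
--     yStart = theList[1][1]
--     xEnd = theList[2][0]
--     yEnd = theList[2][1]
--
--     #modification
--     for x in range(xStart, xEnd + 1, 1):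
--         for y in range(yStart, yEnd + 1, 1):
--             theTuple = (x, y)
--             theBool = theGrid.get(theTuple,)
--             theGrid[theTuple] = modificationModificationMicro(theCommand, theBool)
--     return theGrid #output dictionary
-- ===== SOURCE B (Python) =====
-- def modificationModification(theList, theGrid):
--     theCommand, (xStart, yStart), (xEnd, yEnd) = theList
--     if theCommand not in ("on", "off", "switch"):
--         # unrecognized commands leave the grid unchanged
--         return theGrid
--     # pass 1: rewrite the entries already present in the rectangle (positions kept)
--     for key, old in list(theGrid.items()):
--         x, y = key
--         if xStart <= x <= xEnd and yStart <= y <= yEnd: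
--             theGrid[key] = (not old) if theCommand == "switch" else theCommand == "on"
--     # pass 2: append the rectangle cells the grid does not yet have, row-major
--     fill = theCommand != "off"
--     missing = [(x, y) for x in range(xStart, xEnd + 1)
--                       for y in range(yStart, yEnd + 1)
--                       if (x, y) not in theGrid]
--     theGrid.update((c, fill) for c in missing)
--     return theGrid
-- ===== Notes on version B (the rewrite author's own statement) =====
-- stated objective: alternative
-- what changed: A walks every rectangle cell, reading and writing the dict per cell through a per-cell command helper; B instead makes one pass over the existing dict entries rewriting those inside the rectangle in place, then a second pass that appends only the missing rectangle cells with one precomputed fill value.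
-- outside the precondition, e.g. on modificationModification(('bogus', (0, 0), (0, 0)), {}): A returns {(0, 0): None}, B returns {}
import Mathlib
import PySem

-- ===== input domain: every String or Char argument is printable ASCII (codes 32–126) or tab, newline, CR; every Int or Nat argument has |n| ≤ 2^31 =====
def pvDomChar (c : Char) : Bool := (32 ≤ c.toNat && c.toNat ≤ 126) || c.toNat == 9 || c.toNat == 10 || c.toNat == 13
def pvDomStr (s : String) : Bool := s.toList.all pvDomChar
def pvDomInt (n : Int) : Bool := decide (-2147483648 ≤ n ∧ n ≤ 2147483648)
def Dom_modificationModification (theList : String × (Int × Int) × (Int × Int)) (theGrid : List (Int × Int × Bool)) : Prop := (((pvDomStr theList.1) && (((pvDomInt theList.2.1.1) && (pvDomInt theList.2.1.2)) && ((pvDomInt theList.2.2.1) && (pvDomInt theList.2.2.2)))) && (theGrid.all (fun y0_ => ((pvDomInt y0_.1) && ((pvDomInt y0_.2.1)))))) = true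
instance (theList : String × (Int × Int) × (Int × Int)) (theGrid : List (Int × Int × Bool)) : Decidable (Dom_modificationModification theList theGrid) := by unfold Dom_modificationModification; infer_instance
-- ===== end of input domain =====

-- B replaces A's per-cell read/dispatch/write over the rectangle with one rewrite pass over the
-- existing dict entries followed by one append pass of only the missing rectangle cells; both
-- Pythons mutate theGrid in place and return it (the equivalence proved is about the return value).

-- ===== PORT A =====
-- dict[(int,int), bool] is the association list List (Int × Int × Bool); dict ops ported by hand
-- (exact Python dict semantics on distinct-key lists: get = first match, assignment overwrites
-- in place or appends at the end).
def pvGridGet (g : List (Int × Int × Bool)) (x y : Int) : Option Bool :=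
  match g with
  | [] => none
  | (a, b, v) :: t => if a = x ∧ b = y then some v else pvGridGet t x y

def pvGridSet (g : List (Int × Int × Bool)) (x y : Int) (v : Bool) : List (Int × Int × Bool) :=
  match g with
  | [] => [(x, y, v)]
  | (a, b, w) :: t => if a = x ∧ b = y then (a, b, v) :: t else (a, b, w) :: pvGridSet t x y v

-- modificationModificationMicro; returns none where Python falls through returning None
def pvMicro (theCommand : String) (theBool : Option Bool) : Option Bool :=
  if theCommand = "on" then some true
  else if theCommand = "off" then some false
  else if theCommand = "switch" then
    (if theBool = some true then some false else some true)
  else none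

def modificationModification (theList : String × (Int × Int) × (Int × Int)) (theGrid : List (Int × Int × Bool)) : List (Int × Int × Bool) :=
  let theCommand := theList.1
  let xStart := theList.2.1.1
  let yStart := theList.2.1.2
  let xEnd := theList.2.2.1
  let yEnd := theList.2.2.2
  (PySem.List.pyRange xStart (xEnd + 1) 1).foldl (fun g x =>
    (PySem.List.pyRange yStart (yEnd + 1) 1).foldl (fun g y =>
      -- Python stores None (not a bool) for unrecognized commands; that is unrepresentable in
      -- List (Int × Int × Bool) and excluded by Pre_; '.getD false' is unreachable inside Pre_.
      pvGridSet g x y ((pvMicro theCommand (pvGridGet g x y)).getD false)) g) theGrid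

-- ===== PORT B =====
def modificationModification_alt (theList : String × (Int × Int) × (Int × Int)) (theGrid : List (Int × Int × Bool)) : List (Int × Int × Bool) :=
  let theCommand := theList.1
  let xStart := theList.2.1.1
  let yStart := theList.2.1.2
  let xEnd := theList.2.2.1
  let yEnd := theList.2.2.2
  if theCommand = "on" ∨ theCommand = "off" ∨ theCommand = "switch" then
    -- pass 1 ('for key, old in list(theGrid.items())' rewriting in place): on the distinct-key
    -- lists Pre_ admits, rewriting each listed key in place is exactly a map over the entries.
    let g1 := theGrid.map (fun e =>
      if xStart ≤ e.1 ∧ e.1 ≤ xEnd ∧ yStart ≤ e.2.1 ∧ e.2.1 ≤ yEnd then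
        (e.1, e.2.1, if theCommand = "switch" then !e.2.2 else decide (theCommand = "on"))
      else e)
    -- pass 2: collect the absent rectangle cells, then append them all with the one fill value
    let fill := decide (theCommand ≠ "off")
    let missing := ((PySem.List.pyRange xStart (xEnd + 1) 1).flatMap (fun x =>
      (PySem.List.pyRange yStart (yEnd + 1) 1).map (fun y => (x, y)))).filter
        (fun c => pvGridGet g1 c.1 c.2 = none)
    g1 ++ missing.map (fun c => (c.1, c.2, fill))
  else theGrid

-- ===== PRECONDITION & SPEC =====
-- Pre_ excludes (a) unrecognized commands over a nonempty rectangle, where Python A stores None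
-- (not a bool) into the dict — not a value of the declared type List (Int × Int × Bool) — and
-- (b) association lists with duplicate keys, which cannot arise from a Python dict argument.
def Pre_modificationModification (theList : String × (Int × Int) × (Int × Int)) (theGrid : List (Int × Int × Bool)) : Prop :=
  (theList.1 = "on" ∨ theList.1 = "off" ∨ theList.1 = "switch" ∨
   theList.2.2.1 < theList.2.1.1 ∨ theList.2.2.2 < theList.2.1.2) ∧
  (theGrid.map (fun e => (e.1, e.2.1))).Nodup
instance (theList : String × (Int × Int) × (Int × Int)) (theGrid : List (Int × Int × Bool)) : Decidable (Pre_modificationModification theList theGrid) := by unfold Pre_modificationModification; infer_instance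

def pvWitness_modificationModification : (String × (Int × Int) × (Int × Int)) × (List (Int × Int × Bool)) :=
  (("switch", (0, 0), (1, 1)), [(0, 0, true), (2, 2, false)])

def Spec_modificationModification (theList : String × (Int × Int) × (Int × Int)) (theGrid : List (Int × Int × Bool)) (out : List (Int × Int × Bool)) : Prop := out = modificationModification_alt theList theGrid
instance (theList : String × (Int × Int) × (Int × Int)) (theGrid : List (Int × Int × Bool)) (out : List (Int × Int × Bool)) : Decidable (Spec_modificationModification theList theGrid out) := by unfold Spec_modificationModification; infer_instance

-- ===== CLAIM =====
def Claim_equal_modificationModification : Prop := ∀ (theList : String × (Int × Int) × (Int × Int)) (theGrid : List (Int × Int × Bool)), Dom_modificationModification theList theGrid → Pre_modificationModification theList theGrid → Spec_modificationModification theList theGrid (modificationModification theList theGrid)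

-- ===== LEMMAS AND PROOFS =====

def pvKeys (g : List (Int × Int × Bool)) : List (Int × Int) := g.map (fun e => (e.1, e.2.1))

theorem pv_switch_val (b : Option Bool) :
    ((if b = some true then (some false : Option Bool) else some true).getD false)
      = !(b.getD false) := by
  rcases b with _ | b
  · rfl
  · cases b <;> rfl

theorem pvGridGet_eq_none_iff (g : List (Int × Int × Bool)) (x y : Int) :
    pvGridGet g x y = none ↔ (x, y) ∉ pvKeys g := by
  induction g with
  | nil => simp [pvGridGet, pvKeys]
  | cons e t ih =>
    obtain ⟨a, b, v⟩ := e
    by_cases h : a = x ∧ b = y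
    · simp [pvGridGet, pvKeys, h, Prod.ext_iff]
    · simp only [pvGridGet, if_neg h, pvKeys, List.map_cons, List.mem_cons]
      rw [ih]
      simp [pvKeys, Prod.ext_iff]
      tauto

theorem pvGridGet_append_none (g h : List (Int × Int × Bool)) (x y : Int) :
    pvGridGet (g ++ h) x y = none ↔ pvGridGet g x y = none ∧ pvGridGet h x y = none := by
  induction g with
  | nil => simp [pvGridGet]
  | cons e t ih =>
    obtain ⟨a, b, v⟩ := e
    by_cases hc : a = x ∧ b = y <;> simp [pvGridGet, hc, ih]

theorem pvKeys_map_upd (g : List (Int × Int × Bool)) (f : Int × Int × Bool → Int × Int × Bool)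
    (hf : ∀ e, ((f e).1, (f e).2.1) = (e.1, e.2.1)) : pvKeys (g.map f) = pvKeys g := by
  simp [pvKeys, List.map_map, Function.comp_def, hf]


-- step characterisation
theorem pvStep_eq (tr : Bool → Bool) (g : List (Int × Int × Bool)) (x y : Int)
    (hn : (pvKeys g).Nodup) :
    pvGridSet g x y (tr ((pvGridGet g x y).getD false))
      = g.map (fun e => if e.1 = x ∧ e.2.1 = y then (e.1, e.2.1, tr e.2.2) else e)
        ++ (if pvGridGet g x y = none then [(x, y, tr false)] else []) := by
  induction g with
  | nil => simp [pvGridGet, pvGridSet]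
  | cons e t ih =>
    obtain ⟨a, b, v⟩ := e
    simp only [pvKeys, List.map_cons, List.nodup_cons] at hn
    by_cases h : a = x ∧ b = y
    · obtain ⟨hx, hy⟩ := h
      subst hx; subst hy
      have hget : pvGridGet ((a, b, v) :: t) a b = some v := by simp [pvGridGet]
      have hmap : t.map (fun e => if e.1 = a ∧ e.2.1 = b then (e.1, e.2.1, tr e.2.2) else e)
          = t.map id := by
        apply List.map_congr_left
        intro e he
        have hk : (e.1, e.2.1) ∈ List.map (fun e => (e.1, e.2.1)) t := List.mem_map_of_mem he
        rw [if_neg]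
        · rfl
        rintro ⟨h1, h2⟩
        exact hn.1 (by simpa [h1, h2] using hk)
      rw [hget]
      simp [pvGridSet, hmap]
    · have hget : pvGridGet ((a, b, v) :: t) x y = pvGridGet t x y := by simp [pvGridGet, h]
      have hset : pvGridSet ((a, b, v) :: t) x y (tr ((pvGridGet t x y).getD false))
          = (a, b, v) :: pvGridSet t x y (tr ((pvGridGet t x y).getD false)) := by
        simp [pvGridSet, h]
      rw [hget, hset, ih hn.2]
      simp only [List.map_cons]
      simp
      intro h1 h2
      exact absurd ⟨h1, h2⟩ h

theorem pvFold_eq (tr : Bool → Bool) :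
    ∀ (L : List (Int × Int)) (g : List (Int × Int × Bool)),
    (pvKeys g).Nodup → L.Nodup →
    L.foldl (fun g c => pvGridSet g c.1 c.2 (tr ((pvGridGet g c.1 c.2).getD false))) g
      = g.map (fun e => if (e.1, e.2.1) ∈ L then (e.1, e.2.1, tr e.2.2) else e)
        ++ (L.filter (fun c => pvGridGet g c.1 c.2 = none)).map (fun c => (c.1, c.2, tr false)) := by
  intro L
  induction L with
  | nil => intro g hg _; simp
  | cons c L ih =>
    intro g hg hL
    obtain ⟨x, y⟩ := c
    simp only [List.nodup_cons] at hL
    rw [List.foldl_cons, pvStep_eq tr g x y hg]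
    by_cases hmem : pvGridGet g x y = none
    · -- key absent from g: the map is the identity and the new cell is appended
      have hkeys : (x, y) ∉ pvKeys g := (pvGridGet_eq_none_iff g x y).mp hmem
      have hid : g.map (fun e => if e.1 = x ∧ e.2.1 = y then (e.1, e.2.1, tr e.2.2) else e)
          = g.map id := by
        apply List.map_congr_left
        intro e he
        rw [if_neg]
        · rfl
        rintro ⟨h1, h2⟩
        have hk : (e.1, e.2.1) ∈ pvKeys g := List.mem_map_of_mem he
        exact hkeys (by rw [← h1, ← h2]; exact hk)
      rw [if_pos hmem, hid, List.map_id]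
      set g' := g ++ [(x, y, tr false)] with hg'
      have hkeys' : pvKeys g' = pvKeys g ++ [(x, y)] := by simp [pvKeys, hg']
      have hnod' : (pvKeys g').Nodup := by
        rw [hkeys']
        simp only [List.nodup_append, List.nodup_cons, List.not_mem_nil, not_false_iff,
          List.nodup_nil, and_true, true_and]
        refine ⟨hg, ?_⟩
        intro a ha b hb hEq
        rw [List.mem_singleton] at hb
        subst hb
        exact hkeys (hEq ▸ ha)
      rw [ih g' hnod' hL.2]
      -- three pieces to line up
      have hmapg' : g'.map (fun e => if (e.1, e.2.1) ∈ L then (e.1, e.2.1, tr e.2.2) else e)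
          = g.map (fun e => if (e.1, e.2.1) ∈ (x, y) :: L then (e.1, e.2.1, tr e.2.2) else e)
            ++ [(x, y, tr false)] := by
        rw [hg', List.map_append]
        congr 1
        · apply List.map_congr_left
          intro e he
          have hne : (e.1, e.2.1) ≠ (x, y) := by
            intro hEq
            exact hkeys (hEq ▸ (List.mem_map_of_mem he : (e.1, e.2.1) ∈ pvKeys g))
          by_cases hin : (e.1, e.2.1) ∈ L <;> simp [hin, hne]
        · simp [hL.1]
      have hfilt : L.filter (fun c => pvGridGet g' c.1 c.2 = none)
          = L.filter (fun c => pvGridGet g c.1 c.2 = none) := by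
        apply List.filter_congr
        intro c hc
        obtain ⟨cx, cy⟩ := c
        have hne : ¬(x = cx ∧ y = cy) := by
          rintro ⟨h1, h2⟩
          exact hL.1 (by simpa [h1, h2] using hc)
        simp [hg', pvGridGet_append_none, pvGridGet, hne]
      rw [hmapg', hfilt, List.filter_cons_of_pos (by simpa using hmem)]
      simp
    · -- key present: the set rewrote it in place
      rw [if_neg hmem, List.append_nil]
      set g' := g.map (fun e => if e.1 = x ∧ e.2.1 = y then (e.1, e.2.1, tr e.2.2) else e)
        with hg'
      have hkeys' : pvKeys g' = pvKeys g := by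
        rw [hg']
        apply pvKeys_map_upd
        intro e
        by_cases hc : e.1 = x ∧ e.2.1 = y <;> simp [hc]
      have hnone' : ∀ cx cy : Int, (pvGridGet g' cx cy = none) ↔ (pvGridGet g cx cy = none) := by
        intro cx cy
        rw [pvGridGet_eq_none_iff, pvGridGet_eq_none_iff, hkeys']
      rw [ih g' (hkeys' ▸ hg) hL.2]
      have hmapg' : g'.map (fun e => if (e.1, e.2.1) ∈ L then (e.1, e.2.1, tr e.2.2) else e)
          = g.map (fun e => if (e.1, e.2.1) ∈ (x, y) :: L then (e.1, e.2.1, tr e.2.2) else e) := by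
        rw [hg', List.map_map]
        apply List.map_congr_left
        intro e _
        by_cases hc : e.1 = x ∧ e.2.1 = y
        · have hx : (e.1, e.2.1) = (x, y) := by simp [hc.1, hc.2]
          have hnotL : (x, y) ∉ L := hL.1
          simp [Function.comp, hc, hnotL]
        · have hx : (e.1, e.2.1) ≠ (x, y) := by
            intro hEq
            exact hc ⟨congrArg Prod.fst hEq, congrArg Prod.snd hEq⟩
          by_cases hin : (e.1, e.2.1) ∈ L <;> simp [Function.comp, hc, hx, hin]
      have hfilt : L.filter (fun c => pvGridGet g' c.1 c.2 = none)
          = L.filter (fun c => pvGridGet g c.1 c.2 = none) := by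
        apply List.filter_congr
        intro c _
        simp [hnone' c.1 c.2]
      rw [hmapg', hfilt, List.filter_cons_of_neg (by simpa using hmem)]

def pvCells (x0 y0 x1 y1 : Int) : List (Int × Int) :=
  (PySem.List.pyRange x0 (x1 + 1) 1).flatMap (fun x =>
    (PySem.List.pyRange y0 (y1 + 1) 1).map (fun y => (x, y)))

theorem pv_mem_cells (x0 y0 x1 y1 : Int) (p : Int × Int) :
    p ∈ pvCells x0 y0 x1 y1 ↔ x0 ≤ p.1 ∧ p.1 ≤ x1 ∧ y0 ≤ p.2 ∧ p.2 ≤ y1 := by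
  obtain ⟨a, b⟩ := p
  simp only [pvCells, List.mem_flatMap, List.mem_map, PySem.List.mem_pyRange_one]
  constructor
  · rintro ⟨x, hx, y, hy, hEq⟩
    rw [Prod.ext_iff] at hEq
    obtain ⟨h1, h2⟩ := hEq
    simp only at h1 h2
    subst h1; subst h2
    exact ⟨hx.1, by omega, hy.1, by omega⟩
  · rintro ⟨h1, h2, h3, h4⟩
    exact ⟨a, ⟨h1, by omega⟩, b, ⟨h3, by omega⟩, rfl⟩

theorem pv_nodup_cells (x0 y0 x1 y1 : Int) : (pvCells x0 y0 x1 y1).Nodup := by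
  unfold pvCells
  rw [List.nodup_flatMap]
  constructor
  · intro x _
    exact (PySem.List.nodup_pyRange_one y0 (y1 + 1)).map (fun a b h => by
      simpa using congrArg Prod.snd h)
  · have := PySem.List.pairwise_lt_pyRange_one x0 (x1 + 1)
    refine this.imp ?_
    intro a b hab p hpa hpb
    simp only [List.mem_map] at hpa hpb
    obtain ⟨ya, _, rfl⟩ := hpa
    obtain ⟨yb, _, hEq⟩ := hpb
    have : b = a := congrArg Prod.fst hEq
    omega

theorem pv_foldl_flatMap_pairs {α β δ : Type} (xs : List α) (ys : List β)
    (f : δ → α × β → δ) (init : δ) :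
    (xs.flatMap (fun x => ys.map (fun y => (x, y)))).foldl f init
      = xs.foldl (fun s x => ys.foldl (fun s y => f s (x, y)) s) init := by
  induction xs generalizing init with
  | nil => rfl
  | cons h t ih => simp [List.flatMap_cons, List.foldl_append, List.foldl_map, ih]

theorem pv_main (tr : Bool → Bool) (x0 y0 x1 y1 : Int) (g : List (Int × Int × Bool))
    (hg : (pvKeys g).Nodup) :
    (PySem.List.pyRange x0 (x1 + 1) 1).foldl (fun g x =>
      (PySem.List.pyRange y0 (y1 + 1) 1).foldl (fun g y =>
        pvGridSet g x y (tr ((pvGridGet g x y).getD false))) g) g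
    = (g.map (fun e => if x0 ≤ e.1 ∧ e.1 ≤ x1 ∧ y0 ≤ e.2.1 ∧ e.2.1 ≤ y1
          then (e.1, e.2.1, tr e.2.2) else e))
      ++ ((pvCells x0 y0 x1 y1).filter (fun c =>
            pvGridGet (g.map (fun e => if x0 ≤ e.1 ∧ e.1 ≤ x1 ∧ y0 ≤ e.2.1 ∧ e.2.1 ≤ y1
              then (e.1, e.2.1, tr e.2.2) else e)) c.1 c.2 = none)).map
          (fun c => (c.1, c.2, tr false)) := by
  have h1 : (PySem.List.pyRange x0 (x1 + 1) 1).foldl (fun g x =>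
      (PySem.List.pyRange y0 (y1 + 1) 1).foldl (fun g y =>
        pvGridSet g x y (tr ((pvGridGet g x y).getD false))) g) g
      = (pvCells x0 y0 x1 y1).foldl (fun g c =>
          pvGridSet g c.1 c.2 (tr ((pvGridGet g c.1 c.2).getD false))) g :=
    (pv_foldl_flatMap_pairs (PySem.List.pyRange x0 (x1 + 1) 1)
      (PySem.List.pyRange y0 (y1 + 1) 1)
      (fun s c => pvGridSet s c.1 c.2 (tr ((pvGridGet s c.1 c.2).getD false))) g).symm
  rw [h1, pvFold_eq tr (pvCells x0 y0 x1 y1) g hg (pv_nodup_cells x0 y0 x1 y1)]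
  have hkeys : pvKeys (g.map (fun e => if x0 ≤ e.1 ∧ e.1 ≤ x1 ∧ y0 ≤ e.2.1 ∧ e.2.1 ≤ y1
      then (e.1, e.2.1, tr e.2.2) else e)) = pvKeys g := by
    apply pvKeys_map_upd
    intro e
    by_cases hc : x0 ≤ e.1 ∧ e.1 ≤ x1 ∧ y0 ≤ e.2.1 ∧ e.2.1 ≤ y1 <;> simp [hc]
  congr 1
  · apply List.map_congr_left
    intro e _
    simp [pv_mem_cells]
  · congr 1
    apply List.filter_congr
    intro c _
    rw [decide_eq_decide, pvGridGet_eq_none_iff, pvGridGet_eq_none_iff, hkeys]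

-- ===== VERDICT =====
theorem modificationModification_spec : Claim_equal_modificationModification := by
  rintro ⟨cmd, ⟨x0, y0⟩, x1, y1⟩ g _ ⟨hpre, hnod⟩
  unfold Spec_modificationModification modificationModification modificationModification_alt
  dsimp only
  have hnod' : (pvKeys g).Nodup := hnod
  by_cases hon : cmd = "on"
  · subst hon
    simp only [pvMicro]
    have := pv_main (fun _ => true) x0 y0 x1 y1 g hnod'
    simpa [pvCells] using this
  · by_cases hoff : cmd = "off"
    · subst hoff
      simp only [pvMicro]
      norm_num
      have := pv_main (fun _ => false) x0 y0 x1 y1 g hnod'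
      simpa [pvCells] using this
    · by_cases hsw : cmd = "switch"
      · subst hsw
        simp only [pvMicro, if_neg hon, if_neg hoff, if_true, or_true]
        simp only [pv_switch_val]
        have := pv_main (fun b => !b) x0 y0 x1 y1 g hnod'
        simpa [pvCells, hoff] using this
      · -- unrecognized command: Pre_ forces an empty rectangle; both sides return theGrid
        rcases hpre with h | h | h | h | h
        · exact absurd h hon
        · exact absurd h hoff
        · exact absurd h hsw
        · dsimp only at h
          rw [PySem.List.pyRange_one_eq_nil (a := (x0 : Int)) (b := x1 + 1) (by omega)]
          simp [hon, hoff, hsw]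
        · dsimp only at h
          rw [PySem.List.pyRange_one_eq_nil (a := (y0 : Int)) (b := y1 + 1) (by omega)]
          simp [hon, hoff, hsw]
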